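-- pv_equiv track=rewrite | github.com/CaptBarbarosa/Python-Exercises | A Data Analyser for the Classification Commit Messages/main.py | users_and_their_ids_in_identifying_text
-- ===== SOURCE A (Python) =====
-- def users_and_their_ids_in_identifying_text(different_users,
--                                             second_file):  # At main we found out how many different users are there in the txt file. And here we will find what id numbers they are using.
--     users_and_index_dictionary = {}  # Firstly, we created an empty dictionary.
--     for current_user_index in range(len(different_users)):
--         users_and_index_dictionary[different_users[current_user_index]] = []
--         for i in range(len(second_file)):
--             if second_file[i][1] == different_users[current_user_index]:
--                 users_and_index_dictionary[different_users[current_user_index]].append(second_file[i][0])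
--     return users_and_index_dictionary
-- ===== SOURCE B (Python) =====
-- def users_and_their_ids_in_identifying_text(different_users, second_file):
--     # One pass: pre-create a bucket per user, then append each record id to its user's bucket.
--     users_and_index_dictionary = {user: [] for user in different_users}
--     for record in second_file:
--         user = record[1]
--         if user in users_and_index_dictionary:
--             users_and_index_dictionary[user].append(record[0])
--     return users_and_index_dictionary
-- ===== Notes on version B (the rewrite author's own statement) =====
-- stated objective: faster
-- what changed: Replaces the per-user rescan of the whole file (nested loops, O(U*N)) by one dict of empty buckets followed by a single pass over the records that appends each id to its user's bucket (O(U+N)).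
-- outside the precondition, e.g. on users_and_their_ids_in_identifying_text([], [['only-one-field']]): A returns {}, B raises IndexError
import Mathlib
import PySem

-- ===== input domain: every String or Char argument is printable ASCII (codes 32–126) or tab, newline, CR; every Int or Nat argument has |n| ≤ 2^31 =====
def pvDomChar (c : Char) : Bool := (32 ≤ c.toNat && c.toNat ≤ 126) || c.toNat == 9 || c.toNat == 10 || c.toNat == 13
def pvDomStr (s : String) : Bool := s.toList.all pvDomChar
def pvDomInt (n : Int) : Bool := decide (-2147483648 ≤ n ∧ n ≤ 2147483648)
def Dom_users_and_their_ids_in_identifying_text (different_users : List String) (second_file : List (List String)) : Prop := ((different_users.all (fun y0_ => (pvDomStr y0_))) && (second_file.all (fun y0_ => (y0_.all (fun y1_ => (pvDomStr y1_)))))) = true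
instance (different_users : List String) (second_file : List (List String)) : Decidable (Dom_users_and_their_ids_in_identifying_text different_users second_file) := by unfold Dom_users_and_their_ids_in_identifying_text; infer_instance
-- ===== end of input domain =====

-- B replaces A's per-user rescan of the whole file (nested loops) by one bucket dict and a single pass over the records: faster (asymptotic).

-- ===== PORT A =====
def users_and_their_ids_in_identifying_text (different_users : List String) (second_file : List (List String)) : List (String × List String) :=
  -- users_and_index_dictionary = {}
  -- for current_user_index in range(len(different_users)): … nested scan of second_file
  let d : PySem.Dict String (List String) :=
    (PySem.List.pyRange 0 (different_users.length : Int) 1).foldl (fun d ci =>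
      let u := PySem.List.pyGetD different_users ci ""          -- different_users[ci]; in range under the loop
      let d := d.insert u []                                     -- dict[u] = []
      (PySem.List.pyRange 0 (second_file.length : Int) 1).foldl (fun d2 i =>
        let row := PySem.List.pyGetD second_file i []            -- second_file[i]; in range under the loop
        if PySem.List.pyGetD row 1 "" == u then                  -- row[1]; total under Pre_
          d2.modify u [] (fun l => l ++ [PySem.List.pyGetD row 0 ""])   -- dict[u].append(row[0])
        else d2) d) PySem.Dict.empty
  d.items

-- ===== PORT B =====
def users_and_their_ids_in_identifying_text_alt (different_users : List String) (second_file : List (List String)) : List (String × List String) :=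
  -- {user: [] for user in different_users}
  let d0 : PySem.Dict String (List String) :=
    different_users.foldl (fun d u => d.insert u []) PySem.Dict.empty
  -- for record in second_file: if record[1] in d: d[record[1]].append(record[0])
  let d :=
    second_file.foldl (fun d record =>
      let user := PySem.List.pyGetD record 1 ""                  -- record[1]; total under Pre_
      if d.contains user then
        d.modify user [] (fun l => l ++ [PySem.List.pyGetD record 0 ""])
      else d) d0
  d.items

-- ===== PRECONDITION & SPEC =====
-- Pre_ excludes files containing a record with fewer than 2 fields: Python A raises IndexError on record[1]
-- whenever different_users is nonempty (and B always does); the only excluded inputs on which A still returns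
-- ({} with different_users = []) are ones where the natural B itself raises.
def Pre_users_and_their_ids_in_identifying_text (different_users : List String) (second_file : List (List String)) : Prop :=
  ∀ row ∈ second_file, 2 ≤ row.length
instance (different_users : List String) (second_file : List (List String)) : Decidable (Pre_users_and_their_ids_in_identifying_text different_users second_file) := by unfold Pre_users_and_their_ids_in_identifying_text; infer_instance

def pvWitness_users_and_their_ids_in_identifying_text : List String × List (List String) :=
  (["ann", "bob"], [["1", "ann"], ["2", "zoe"], ["3", "ann"]])

def Spec_users_and_their_ids_in_identifying_text (different_users : List String) (second_file : List (List String)) (out : List (String × List String)) : Prop := out = users_and_their_ids_in_identifying_text_alt different_users second_file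
instance (different_users : List String) (second_file : List (List String)) (out : List (String × List String)) : Decidable (Spec_users_and_their_ids_in_identifying_text different_users second_file out) := by unfold Spec_users_and_their_ids_in_identifying_text; infer_instance

-- ===== CLAIM (what is proved, stated in full; the proofs are below) =====
def Claim_equal_users_and_their_ids_in_identifying_text : Prop := ∀ (different_users : List String) (second_file : List (List String)), Dom_users_and_their_ids_in_identifying_text different_users second_file → Pre_users_and_their_ids_in_identifying_text different_users second_file → Spec_users_and_their_ids_in_identifying_text different_users second_file (users_and_their_ids_in_identifying_text different_users second_file)

-- ===== LEMMAS AND PROOFS =====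

-- ids of the records belonging to user u, in file order
def pvMatch (sf : List (List String)) (u : String) : List String :=
  (sf.filter (fun row => PySem.List.pyGetD row 1 "" == u)).map (fun row => PySem.List.pyGetD row 0 "")

theorem pvMatch_cons (row : List String) (t : List (List String)) (u : String) :
    pvMatch (row :: t) u =
      if PySem.List.pyGetD row 1 "" == u then PySem.List.pyGetD row 0 "" :: pvMatch t u else pvMatch t u := by
  by_cases h : (PySem.List.pyGetD row 1 "" == u) = true <;> simp [pvMatch, h]

-- dict[k] = d.get(k, []) ++ [x]  is an insert (definitional)
theorem pv_modify_eq (d : PySem.Dict String (List String)) (k : String) (f : List String → List String) :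
    d.modify k [] f = d.insert k (f (d.getD k [])) := rfl

-- A's inner loop over one user, as a fold over the records
def pvInnerA (sf : List (List String)) (u : String) (d : PySem.Dict String (List String)) : PySem.Dict String (List String) :=
  sf.foldl (fun d2 row =>
    if PySem.List.pyGetD row 1 "" == u then d2.modify u [] (fun l => l ++ [PySem.List.pyGetD row 0 ""]) else d2) d

theorem pvInnerA_cons (row : List String) (t : List (List String)) (u : String) (d : PySem.Dict String (List String)) :
    pvInnerA (row :: t) u d =
      pvInnerA t u (if PySem.List.pyGetD row 1 "" == u then d.modify u [] (fun l => l ++ [PySem.List.pyGetD row 0 ""]) else d) := by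
  simp only [pvInnerA, List.foldl_cons]

theorem keys_pvInnerA (sf : List (List String)) (u : String) (d : PySem.Dict String (List String))
    (h : d.contains u = true) : (pvInnerA sf u d).keys = d.keys := by
  induction sf generalizing d with
  | nil => rfl
  | cons row t ih =>
    rw [pvInnerA_cons]
    split_ifs with hm
    · rw [pv_modify_eq, ih _ (PySem.Dict.contains_insert_self _ _ _),
        PySem.Dict.keys_insert_of_contains _ _ h]
    · exact ih d h

theorem getD_pvInnerA (sf : List (List String)) (u : String) (d : PySem.Dict String (List String))
    (h : d.contains u = true) (k : String) :
    (pvInnerA sf u d).getD k [] = if k = u then d.getD u [] ++ pvMatch sf u else d.getD k [] := by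
  induction sf generalizing d with
  | nil =>
    by_cases hk : k = u <;> simp [pvInnerA, pvMatch, hk]
  | cons row t ih =>
    rw [pvInnerA_cons, pvMatch_cons]
    by_cases hm : (PySem.List.pyGetD row 1 "" == u) = true
    · simp only [if_pos hm]
      rw [pv_modify_eq, ih _ (PySem.Dict.contains_insert_self _ _ _)]
      by_cases hk : k = u
      · subst hk
        rw [if_pos rfl, if_pos rfl, PySem.Dict.getD_insert_self, List.append_assoc]
        simp
      · rw [if_neg hk, if_neg hk, PySem.Dict.getD_insert_of_ne _ _ _ hk]
    · simp only [if_neg hm]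
      exact ih d h

-- A's whole dictionary
def pvDictA (du : List String) (sf : List (List String)) : PySem.Dict String (List String) :=
  du.foldl (fun d u => pvInnerA sf u (d.insert u [])) PySem.Dict.empty

theorem keys_pvDictA_aux (du : List String) (sf : List (List String)) (d : PySem.Dict String (List String)) :
    (du.foldl (fun d u => pvInnerA sf u (d.insert u [])) d).keys = PySem.Set.update d.keys du := by
  induction du generalizing d with
  | nil => rfl
  | cons u t ih =>
    simp only [List.foldl_cons]
    rw [ih, keys_pvInnerA _ _ _ (PySem.Dict.contains_insert_self _ _ _)]
    have hstep : (d.insert u ([] : List String)).keys = PySem.Set.add d.keys u := by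
      by_cases h : d.contains u = true
      · have hmem : u ∈ d.keys := (PySem.Dict.contains_iff_mem_keys d u).mp h
        rw [PySem.Dict.keys_insert_of_contains _ _ h]
        simp [PySem.Set.add, PySem.Set.contains, hmem]
      · have hmem : u ∉ d.keys := fun hm => h ((PySem.Dict.contains_iff_mem_keys d u).mpr hm)
        rw [PySem.Dict.keys_insert_of_not_contains _ _ (by simpa using h)]
        simp [PySem.Set.add, PySem.Set.contains, hmem]
    rw [hstep]
    rfl

theorem getD_pvDictA_aux (du : List String) (sf : List (List String)) (d : PySem.Dict String (List String)) (k : String) :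
    (du.foldl (fun d u => pvInnerA sf u (d.insert u [])) d).getD k [] =
      if k ∈ du then pvMatch sf k else d.getD k [] := by
  induction du generalizing d with
  | nil => simp
  | cons u t ih =>
    simp only [List.foldl_cons]
    rw [ih]
    by_cases ht : k ∈ t
    · simp [ht]
    · rw [getD_pvInnerA _ _ _ (PySem.Dict.contains_insert_self _ _ _)]
      by_cases hk : k = u
      · subst hk
        simp [ht, PySem.Dict.getD_insert_self]
      · simp [ht, hk, PySem.Dict.getD_insert_of_ne _ _ _ hk]

theorem nodup_keys_pvDictA (du : List String) (sf : List (List String)) :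
    (pvDictA du sf).keys.Nodup := by
  have h : ∀ (l : List String) (d : PySem.Dict String (List String)), d.keys.Nodup →
      (l.foldl (fun d u => pvInnerA sf u (d.insert u [])) d).keys.Nodup := by
    intro l
    induction l with
    | nil => intro d h; exact h
    | cons u t ih =>
      intro d h
      simp only [List.foldl_cons]
      refine ih _ ?_
      rw [keys_pvInnerA _ _ _ (PySem.Dict.contains_insert_self _ _ _)]
      exact PySem.Dict.nodup_keys_insert _ _ _ h
  exact h du PySem.Dict.empty (by simp)

-- bridging port A's index loops to the record/user folds
theorem portA_eq (du : List String) (sf : List (List String)) :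
    users_and_their_ids_in_identifying_text du sf = (pvDictA du sf).items := by
  unfold users_and_their_ids_in_identifying_text pvDictA
  have h1 : (fun (d : PySem.Dict String (List String)) (ci : Int) =>
      let u := PySem.List.pyGetD du ci ""
      let d := d.insert u []
      (PySem.List.pyRange 0 (sf.length : Int) 1).foldl (fun d2 i =>
        let row := PySem.List.pyGetD sf i []
        if PySem.List.pyGetD row 1 "" == u then
          d2.modify u [] (fun l => l ++ [PySem.List.pyGetD row 0 ""])
        else d2) d)
      = fun d ci => pvInnerA sf (PySem.List.pyGetD du ci "") (d.insert (PySem.List.pyGetD du ci "") []) := by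
    funext d ci
    exact PySem.List.foldl_pyRange_zero_pyGetD' sf []
      (fun d2 row => if PySem.List.pyGetD row 1 "" == (PySem.List.pyGetD du ci "") then
          d2.modify (PySem.List.pyGetD du ci "") [] (fun l => l ++ [PySem.List.pyGetD row 0 ""]) else d2)
      (d.insert (PySem.List.pyGetD du ci "") [])
  rw [h1]
  exact congrArg PySem.Dict.items (PySem.List.foldl_pyRange_zero_pyGetD' du ""
    (fun d u => pvInnerA sf u (d.insert u [])) PySem.Dict.empty)

-- the canonical value of port A
theorem items_A (du : List String) (sf : List (List String)) :
    users_and_their_ids_in_identifying_text du sf =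
      (PySem.Set.ofList du).map (fun k => (k, pvMatch sf k)) := by
  rw [portA_eq, PySem.Dict.items_eq_map_keys _ (nodup_keys_pvDictA du sf) []]
  have hkeys : (pvDictA du sf).keys = PySem.Set.ofList du := by
    rw [pvDictA, keys_pvDictA_aux, PySem.Dict.keys_empty]
    rfl
  rw [hkeys]
  refine List.map_congr_left ?_
  intro k hk
  have hkdu : k ∈ du := (PySem.Set.mem_ofList _ _).mp hk
  rw [show pvDictA du sf = du.foldl (fun d u => pvInnerA sf u (d.insert u [])) PySem.Dict.empty from rfl,
    getD_pvDictA_aux, if_pos hkdu]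

-- B's bucket dictionary
def pvDictB0 (du : List String) : PySem.Dict String (List String) :=
  du.foldl (fun d u => d.insert u []) PySem.Dict.empty

theorem keys_pvDictB0 (du : List String) : (pvDictB0 du).keys = PySem.Set.ofList du := by
  rw [pvDictB0, PySem.Dict.keys_foldl_insert _ (fun _ _ => ([] : List String)), PySem.Dict.keys_empty]
  rfl

theorem nodup_keys_pvDictB0 (du : List String) : (pvDictB0 du).keys.Nodup := by
  rw [keys_pvDictB0]
  exact PySem.Set.nodup_ofList du

theorem getD_pvDictB0 (du : List String) (k : String) : (pvDictB0 du).getD k [] = [] := by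
  have h : ∀ (l : List String) (d : PySem.Dict String (List String)), d.getD k [] = [] →
      (l.foldl (fun d u => d.insert u ([] : List String)) d).getD k [] = [] := by
    intro l
    induction l with
    | nil => intro d h; exact h
    | cons u t ih =>
      intro d h
      simp only [List.foldl_cons]
      refine ih _ ?_
      rw [PySem.Dict.getD_insert]
      split_ifs <;> simp [h]
  exact h du PySem.Dict.empty (by simp [PySem.Dict.getD_empty])

-- B's filling pass
def pvFill (sf : List (List String)) (d : PySem.Dict String (List String)) : PySem.Dict String (List String) :=
  sf.foldl (fun d record =>
    if d.contains (PySem.List.pyGetD record 1 "") then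
      d.modify (PySem.List.pyGetD record 1 "") [] (fun l => l ++ [PySem.List.pyGetD record 0 ""])
    else d) d

theorem pvFill_cons (row : List String) (t : List (List String)) (d : PySem.Dict String (List String)) :
    pvFill (row :: t) d =
      pvFill t (if d.contains (PySem.List.pyGetD row 1 "") then
        d.modify (PySem.List.pyGetD row 1 "") [] (fun l => l ++ [PySem.List.pyGetD row 0 ""]) else d) := by
  simp only [pvFill, List.foldl_cons]

theorem keys_pvFill (sf : List (List String)) (d : PySem.Dict String (List String)) :
    (pvFill sf d).keys = d.keys := by
  induction sf generalizing d with
  | nil => rfl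
  | cons row t ih =>
    rw [pvFill_cons]
    split_ifs with hc
    · rw [pv_modify_eq, ih, PySem.Dict.keys_insert_of_contains _ _ hc]
    · exact ih d

theorem getD_pvFill (sf : List (List String)) (d : PySem.Dict String (List String)) (k : String) :
    (pvFill sf d).getD k [] = d.getD k [] ++ (if d.contains k then pvMatch sf k else []) := by
  induction sf generalizing d with
  | nil => simp [pvFill, pvMatch]
  | cons row t ih =>
    rw [pvFill_cons, pvMatch_cons]
    by_cases hc : d.contains (PySem.List.pyGetD row 1 "") = true
    · rw [if_pos hc, pv_modify_eq, ih]
      by_cases hk : k = PySem.List.pyGetD row 1 ""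
      · subst hk
        rw [PySem.Dict.getD_insert_self, if_pos (PySem.Dict.contains_insert_self _ _ _),
          if_pos hc, if_pos (by simp), List.append_assoc]
        simp
      · have hm : ¬ (PySem.List.pyGetD row 1 "" == k) = true := fun hb => hk (eq_of_beq hb).symm
        rw [PySem.Dict.getD_insert_of_ne _ _ _ hk, if_neg hm,
          PySem.Dict.contains_eq_decide_mem_keys, PySem.Dict.keys_insert_of_contains _ _ hc,
          ← PySem.Dict.contains_eq_decide_mem_keys]
    · rw [if_neg hc, ih]
      by_cases hck : d.contains k = true
      · have hk : ¬ (PySem.List.pyGetD row 1 "" == k) = true := fun hb => hc (by rwa [eq_of_beq hb])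
        rw [if_pos hck, if_pos hck, if_neg hk]
      · simp [hck]

-- the canonical value of port B
theorem items_B (du : List String) (sf : List (List String)) :
    users_and_their_ids_in_identifying_text_alt du sf =
      (PySem.Set.ofList du).map (fun k => (k, pvMatch sf k)) := by
  have h0 : users_and_their_ids_in_identifying_text_alt du sf = (pvFill sf (pvDictB0 du)).items := rfl
  have hnd : (pvFill sf (pvDictB0 du)).keys.Nodup := by
    rw [keys_pvFill]; exact nodup_keys_pvDictB0 du
  rw [h0, PySem.Dict.items_eq_map_keys _ hnd [], keys_pvFill, keys_pvDictB0]
  refine List.map_congr_left ?_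
  intro k hk
  have hc : (pvDictB0 du).contains k = true := by
    rw [PySem.Dict.contains_iff_mem_keys, keys_pvDictB0]
    exact hk
  rw [getD_pvFill, getD_pvDictB0, if_pos hc]
  simp

-- ===== VERDICT (by name: the statement is the Claim_ definition above) =====
theorem users_and_their_ids_in_identifying_text_spec : Claim_equal_users_and_their_ids_in_identifying_text := by
  intro du sf _ _
  unfold Spec_users_and_their_ids_in_identifying_text
  rw [items_A, items_B]
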